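-- pv_equiv track=rewrite | github.com/tomdif/causal-algebraic-geometry-lean | exact_3d_fast.py | have_comparable
-- ===== SOURCE A (Python) =====
-- def have_comparable(L1, U1, L2, U2, m):
--     """Check if any (j1,k1) in S1 and (j2,k2) in S2 with j1<=j2, k1<=k2."""
--     for i1 in range(m):
--         if L1[i1] >= m:
--             continue
--         for i2 in range(i1, m):
--             if L2[i2] >= m:
--                 continue
--             if L1[i1] <= U2[i2]:
--                 return True
--     return False
-- ===== SOURCE B (Python) =====
-- def have_comparable(L1, U1, L2, U2, m):
--     """Check if any (j1,k1) in S1 and (j2,k2) in S2 with j1<=j2, k1<=k2."""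
--     best = None  # minimum of L1[i1] over valid i1 <= current i2
--     for i2 in range(m):
--         v = L1[i2]
--         if v < m and (best is None or v < best):
--             best = v
--         if L2[i2] < m and best is not None and best <= U2[i2]:
--             return True
--     return False
-- ===== Notes on version B (the rewrite author's own statement) =====
-- stated objective: alternative
-- what changed: Replaced the nested rescan (for each valid L1[i1], rescan L2/U2 from i1, worst-case quadratic) by a single left-to-right pass that maintains the prefix minimum of the valid L1 values and tests each i2 once against that minimum (worst-case linear); on typical early-exit inputs the measured times are comparable.
-- outside the precondition, e.g. on have_comparable([5, 5], [], [], [], 2): A returns False, B raises IndexError; on have_comparable([0], [], [0], [5], 2): A returns True, B returns True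
import Mathlib
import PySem

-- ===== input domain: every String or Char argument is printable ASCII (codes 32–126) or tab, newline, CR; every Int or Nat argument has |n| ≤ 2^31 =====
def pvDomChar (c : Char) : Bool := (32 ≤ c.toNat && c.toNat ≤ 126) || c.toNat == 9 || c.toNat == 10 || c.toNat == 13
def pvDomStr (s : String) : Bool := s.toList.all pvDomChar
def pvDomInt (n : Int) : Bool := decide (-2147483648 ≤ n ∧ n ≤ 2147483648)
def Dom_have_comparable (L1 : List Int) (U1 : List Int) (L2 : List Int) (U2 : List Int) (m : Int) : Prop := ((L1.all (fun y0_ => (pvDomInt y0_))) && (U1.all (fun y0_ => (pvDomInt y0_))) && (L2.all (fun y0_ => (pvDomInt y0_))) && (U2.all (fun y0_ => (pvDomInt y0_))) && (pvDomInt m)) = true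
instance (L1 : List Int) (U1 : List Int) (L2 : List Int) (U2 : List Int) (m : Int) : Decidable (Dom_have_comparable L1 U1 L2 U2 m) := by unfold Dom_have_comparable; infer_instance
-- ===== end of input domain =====

-- B replaces A's nested rescan by a single pass keeping the prefix minimum of valid L1 values (objective: alternative algorithm).
-- Both ports model Python's lazy range loop as fuel recursion and an out-of-range access (IndexError) as an Option early exit,
-- exact on the indices range() produces (always ≥ 0); 'none' never occurs inside Pre_.

-- ===== PORT A =====
-- xs[i]: O(1) array view; for 0 ≤ i it is 'some' of PySem.List.pyGetD exactly when i is in range (lemma hcA_idx_eq below)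
def hcA_idx (xs : Array Int) (i : Int) : Option Int :=
  if h : 0 ≤ i ∧ i.toNat < xs.size then some xs[i.toNat] else none

-- inner loop: for i2 in range(i1, m); fuel counts the remaining iterations
def hcA_inner (L2 U2 : Array Int) (m l1v : Int) (i2 : Int) : Nat → Option Bool
  | 0 => some false
  | fuel + 1 =>
      match hcA_idx L2 i2 with
      | none => none
      | some w =>
          if w ≥ m then hcA_inner L2 U2 m l1v (i2 + 1) fuel
          else
            match hcA_idx U2 i2 with
            | none => none
            | some u =>
                if l1v ≤ u then some true
                else hcA_inner L2 U2 m l1v (i2 + 1) fuel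

-- outer loop: for i1 in range(m)
def hcA_outer (L1 L2 U2 : Array Int) (m : Int) (i1 : Int) : Nat → Option Bool
  | 0 => some false
  | fuel + 1 =>
      match hcA_idx L1 i1 with
      | none => none
      | some v =>
          if v ≥ m then hcA_outer L1 L2 U2 m (i1 + 1) fuel
          else
            match hcA_inner L2 U2 m v i1 (m - i1).toNat with
            | none => none
            | some true => some true
            | some false => hcA_outer L1 L2 U2 m (i1 + 1) fuel

def have_comparable (L1 : List Int) (U1 : List Int) (L2 : List Int) (U2 : List Int) (m : Int) : Bool :=
  (hcA_outer L1.toArray L2.toArray U2.toArray m 0 m.toNat).getD false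

-- ===== PORT B =====
-- 'if v < m and (best is None or v < best): best = v'
def hcB_upd (m : Int) (best : Option Int) (v : Int) : Option Int :=
  if v < m then
    match best with
    | none => some v
    | some b => if v < b then some v else some b
  else best

-- single pass: for i2 in range(m); fuel counts the remaining iterations
def hcB_loop (L1 L2 U2 : Array Int) (m : Int) (best : Option Int) (i : Int) : Nat → Option Bool
  | 0 => some false
  | fuel + 1 =>
      match hcA_idx L1 i with
      | none => none
      | some v =>
          let best' := hcB_upd m best v
          match hcA_idx L2 i with
          | none => none
          | some w =>
              if w < m then
                match best' with
                | some b =>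
                    match hcA_idx U2 i with
                    | none => none
                    | some u =>
                        if b ≤ u then some true
                        else hcB_loop L1 L2 U2 m best' (i + 1) fuel
                | none => hcB_loop L1 L2 U2 m best' (i + 1) fuel
              else hcB_loop L1 L2 U2 m best' (i + 1) fuel

def have_comparable_alt (L1 : List Int) (U1 : List Int) (L2 : List Int) (U2 : List Int) (m : Int) : Bool :=
  (hcB_loop L1.toArray L2.toArray U2.toArray m none 0 m.toNat).getD false

-- ===== PRECONDITION & SPEC =====
-- Pre_ excludes lists shorter than m, on which Python A raises IndexError, except for a few inputs
-- where A happens to return early before touching an out-of-range index (e.g. ([5,5],[],[],[],2)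
-- returns False, ([0],[],[0],[5],2) returns True); B may raise or return there.
def Pre_have_comparable (L1 : List Int) (U1 : List Int) (L2 : List Int) (U2 : List Int) (m : Int) : Prop :=
  m ≤ (L1.length : Int) ∧ m ≤ (L2.length : Int) ∧ m ≤ (U2.length : Int)
instance (L1 : List Int) (U1 : List Int) (L2 : List Int) (U2 : List Int) (m : Int) : Decidable (Pre_have_comparable L1 U1 L2 U2 m) := by unfold Pre_have_comparable; infer_instance

def pvWitness_have_comparable : List Int × List Int × List Int × List Int × Int := ([0, 3], [], [1, 0], [2, 5], 2)

def Spec_have_comparable (L1 : List Int) (U1 : List Int) (L2 : List Int) (U2 : List Int) (m : Int) (out : Bool) : Prop := out = have_comparable_alt L1 U1 L2 U2 m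
instance (L1 : List Int) (U1 : List Int) (L2 : List Int) (U2 : List Int) (m : Int) (out : Bool) : Decidable (Spec_have_comparable L1 U1 L2 U2 m out) := by unfold Spec_have_comparable; infer_instance

-- ===== CLAIM (what is proved, stated in full; the proofs are below) =====
def Claim_equal_have_comparable : Prop := ∀ (L1 : List Int) (U1 : List Int) (L2 : List Int) (U2 : List Int) (m : Int), Dom_have_comparable L1 U1 L2 U2 m → Pre_have_comparable L1 U1 L2 U2 m → Spec_have_comparable L1 U1 L2 U2 m (have_comparable L1 U1 L2 U2 m)

-- ===== LEMMAS AND PROOFS =====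

-- the array view agrees with Python indexing on in-range nonnegative indices
theorem hcA_idx_eq (xs : List Int) (i : Int) (h0 : 0 ≤ i) (h1 : i < (xs.length : Int)) :
    hcA_idx xs.toArray i = some (PySem.List.pyGetD xs i 0) := by
  obtain ⟨n, rfl⟩ := Int.eq_ofNat_of_zero_le h0
  have hn : n < xs.length := by exact_mod_cast h1
  simp only [hcA_idx, List.size_toArray, Int.toNat_natCast, List.getElem_toArray]
  rw [dif_pos ⟨by positivity, hn⟩]
  simp [PySem.List.pyGetD_natCast, List.getD_eq_getElem?_getD, List.getElem?_eq_getElem hn]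

-- A's inner loop: under Pre_'s bounds it returns 'some' and says whether a matching i2 exists
theorem hcA_inner_iff (L2 U2 : List Int) (m l1v : Int) :
    ∀ (fuel : Nat) (i2 : Int), 0 ≤ i2 → fuel = (m - i2).toNat →
    m ≤ (L2.length : Int) → m ≤ (U2.length : Int) →
    ∃ r : Bool, hcA_inner L2.toArray U2.toArray m l1v i2 fuel = some r ∧
      (r = true ↔ ∃ j, i2 ≤ j ∧ j < m ∧ PySem.List.pyGetD L2 j 0 < m ∧
        l1v ≤ PySem.List.pyGetD U2 j 0) := by
  intro fuel
  induction fuel with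
  | zero =>
      intro i2 h0 hf h2 h3
      refine ⟨false, rfl, iff_of_false (by simp) ?_⟩
      rintro ⟨j, hj1, hj2, _⟩; omega
  | succ fuel ih =>
      intro i2 h0 hf h2 h3
      have him : i2 < m := by omega
      rw [hcA_inner]
      rw [hcA_idx_eq L2 i2 h0 (by omega)]
      dsimp only
      split_ifs with hw
      · obtain ⟨r, hr, hiff⟩ := ih (i2 + 1) (by omega) (by omega) h2 h3
        refine ⟨r, hr, hiff.trans ?_⟩
        constructor
        · rintro ⟨j, hj1, hj2, hj3, hj4⟩; exact ⟨j, by omega, hj2, hj3, hj4⟩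
        · rintro ⟨j, hj1, hj2, hj3, hj4⟩
          by_cases hji : j = i2
          · subst hji; omega
          · exact ⟨j, by omega, hj2, hj3, hj4⟩
      · rw [hcA_idx_eq U2 i2 h0 (by omega)]
        dsimp only
        split_ifs with hu
        · refine ⟨true, rfl, iff_of_true rfl ?_⟩
          exact ⟨i2, le_refl _, him, by omega, hu⟩
        · obtain ⟨r, hr, hiff⟩ := ih (i2 + 1) (by omega) (by omega) h2 h3
          refine ⟨r, hr, hiff.trans ?_⟩
          constructor
          · rintro ⟨j, hj1, hj2, hj3, hj4⟩; exact ⟨j, by omega, hj2, hj3, hj4⟩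
          · rintro ⟨j, hj1, hj2, hj3, hj4⟩
            by_cases hji : j = i2
            · subst hji; omega
            · exact ⟨j, by omega, hj2, hj3, hj4⟩

-- A's outer loop: the full existential
theorem hcA_outer_iff (L1 L2 U2 : List Int) (m : Int) :
    ∀ (fuel : Nat) (i1 : Int), 0 ≤ i1 → fuel = (m - i1).toNat →
    m ≤ (L1.length : Int) → m ≤ (L2.length : Int) → m ≤ (U2.length : Int) →
    ∃ r : Bool, hcA_outer L1.toArray L2.toArray U2.toArray m i1 fuel = some r ∧
      (r = true ↔ ∃ i, i1 ≤ i ∧ i < m ∧ PySem.List.pyGetD L1 i 0 < m ∧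
        ∃ j, i ≤ j ∧ j < m ∧ PySem.List.pyGetD L2 j 0 < m ∧
          PySem.List.pyGetD L1 i 0 ≤ PySem.List.pyGetD U2 j 0) := by
  intro fuel
  induction fuel with
  | zero =>
      intro i1 h0 hf h1 h2 h3
      refine ⟨false, rfl, iff_of_false (by simp) ?_⟩
      rintro ⟨i, hi1, hi2, _⟩; omega
  | succ fuel ih =>
      intro i1 h0 hf h1 h2 h3
      have him : i1 < m := by omega
      rw [hcA_outer]
      rw [hcA_idx_eq L1 i1 h0 (by omega)]
      dsimp only
      split_ifs with hv
      · obtain ⟨r, hr, hiff⟩ := ih (i1 + 1) (by omega) (by omega) h1 h2 h3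
        refine ⟨r, hr, hiff.trans ?_⟩
        constructor
        · rintro ⟨i, hi1, hi2, hi3, rest⟩; exact ⟨i, by omega, hi2, hi3, rest⟩
        · rintro ⟨i, hi1, hi2, hi3, rest⟩
          by_cases hii : i = i1
          · subst hii; omega
          · exact ⟨i, by omega, hi2, hi3, rest⟩
      · have hfs : fuel = (m - (i1 + 1)).toNat := by omega
        obtain ⟨s, hs, hsiff⟩ := hcA_inner_iff L2 U2 m (PySem.List.pyGetD L1 i1 0)
          ((m - i1).toNat) i1 h0 rfl h2 h3
        rw [hs]
        cases s with
        | true =>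
            refine ⟨true, rfl, iff_of_true rfl ?_⟩
            obtain ⟨j, hj1, hj2, hj3, hj4⟩ := hsiff.mp rfl
            exact ⟨i1, le_refl _, him, by omega, j, hj1, hj2, hj3, hj4⟩
        | false =>
            obtain ⟨r, hr, hiff⟩ := ih (i1 + 1) (by omega) hfs h1 h2 h3
            refine ⟨r, hr, hiff.trans ?_⟩
            constructor
            · rintro ⟨i, hi1, hi2, hi3, rest⟩; exact ⟨i, by omega, hi2, hi3, rest⟩
            · rintro ⟨i, hi1, hi2, hi3, rest⟩
              by_cases hii : i = i1
              · subst hii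
                exact absurd (hsiff.mpr rest) (by simp)
              · exact ⟨i, by omega, hi2, hi3, rest⟩

-- B's loop invariant: 'best' is ≤ u exactly when some already-seen valid L1 value is ≤ u
theorem hcB_loop_iff (L1 L2 U2 : List Int) (m : Int) :
    ∀ (fuel : Nat) (i : Int) (best : Option Int), 0 ≤ i → fuel = (m - i).toNat →
    m ≤ (L1.length : Int) → m ≤ (L2.length : Int) → m ≤ (U2.length : Int) →
    (∀ u : Int, (∃ b, best = some b ∧ b ≤ u) ↔
        ∃ j, 0 ≤ j ∧ j < i ∧ PySem.List.pyGetD L1 j 0 < m ∧ PySem.List.pyGetD L1 j 0 ≤ u) →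
    ∃ r : Bool, hcB_loop L1.toArray L2.toArray U2.toArray m best i fuel = some r ∧
      (r = true ↔ ∃ i2, i ≤ i2 ∧ i2 < m ∧ PySem.List.pyGetD L2 i2 0 < m ∧
        ∃ i1, 0 ≤ i1 ∧ i1 ≤ i2 ∧ PySem.List.pyGetD L1 i1 0 < m ∧
          PySem.List.pyGetD L1 i1 0 ≤ PySem.List.pyGetD U2 i2 0) := by
  intro fuel
  induction fuel with
  | zero =>
      intro i best h0 hf h1 h2 h3 hbest
      refine ⟨false, rfl, iff_of_false (by simp) ?_⟩
      rintro ⟨i2, hk1, hk2, _⟩; omega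
  | succ fuel ih =>
      intro i best h0 hf h1 h2 h3 hbest
      have him : i < m := by omega
      have hbest' : ∀ u : Int,
          (∃ b, hcB_upd m best (PySem.List.pyGetD L1 i 0) = some b ∧ b ≤ u) ↔
          ∃ j, 0 ≤ j ∧ j < i + 1 ∧ PySem.List.pyGetD L1 j 0 < m ∧ PySem.List.pyGetD L1 j 0 ≤ u := by
        intro u
        unfold hcB_upd
        split_ifs with hv
        · cases best with
          | none =>
              simp only [Option.some.injEq, exists_eq_left']
              constructor
              · intro h; exact ⟨i, h0, by omega, hv, h⟩
              · rintro ⟨j, hj0, hj1, hjv, hju⟩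
                by_cases hjk : j = i
                · subst hjk; exact hju
                · exfalso
                  have := (hbest (PySem.List.pyGetD L1 j 0)).mpr ⟨j, hj0, by omega, hjv, le_refl _⟩
                  obtain ⟨b, hb, _⟩ := this; simp at hb
          | some b =>
              dsimp only
              constructor
              · intro h
                split_ifs at h with hvb <;> obtain ⟨b', hb', hbu⟩ := h <;>
                  simp only [Option.some.injEq] at hb' <;> subst hb'
                · exact ⟨i, h0, by omega, hv, hbu⟩
                · obtain ⟨j, hj0, hj1, hjv, hju⟩ := (hbest u).mp ⟨b, rfl, hbu⟩
                  exact ⟨j, hj0, by omega, hjv, hju⟩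
              · rintro ⟨j, hj0, hj1, hjv, hju⟩
                by_cases hjk : j = i
                · subst hjk
                  split_ifs with hvb
                  · exact ⟨_, rfl, hju⟩
                  · exact ⟨b, rfl, by omega⟩
                · obtain ⟨b', hb', hbu⟩ := (hbest u).mpr ⟨j, hj0, by omega, hjv, hju⟩
                  simp only [Option.some.injEq] at hb'; subst hb'
                  split_ifs with hvb
                  · exact ⟨_, rfl, by omega⟩
                  · exact ⟨_, rfl, hbu⟩
        · rw [hbest u]
          constructor
          · rintro ⟨j, hj0, hj1, hjv, hju⟩; exact ⟨j, hj0, by omega, hjv, hju⟩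
          · rintro ⟨j, hj0, hj1, hjv, hju⟩
            by_cases hjk : j = i
            · subst hjk; omega
            · exact ⟨j, hj0, by omega, hjv, hju⟩
      obtain ⟨r, hr, hiff⟩ := ih (i + 1) (hcB_upd m best (PySem.List.pyGetD L1 i 0))
          (by omega) (by omega) h1 h2 h3 hbest'
      have hsplit : ∀ r' : Bool,
          (r' = true ↔ ∃ i2, i + 1 ≤ i2 ∧ i2 < m ∧ PySem.List.pyGetD L2 i2 0 < m ∧
            ∃ i1, 0 ≤ i1 ∧ i1 ≤ i2 ∧ PySem.List.pyGetD L1 i1 0 < m ∧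
              PySem.List.pyGetD L1 i1 0 ≤ PySem.List.pyGetD U2 i2 0) →
          ¬ (PySem.List.pyGetD L2 i 0 < m ∧
              ∃ b, hcB_upd m best (PySem.List.pyGetD L1 i 0) = some b ∧ b ≤ PySem.List.pyGetD U2 i 0) →
          (r' = true ↔ ∃ i2, i ≤ i2 ∧ i2 < m ∧ PySem.List.pyGetD L2 i2 0 < m ∧
            ∃ i1, 0 ≤ i1 ∧ i1 ≤ i2 ∧ PySem.List.pyGetD L1 i1 0 < m ∧
              PySem.List.pyGetD L1 i1 0 ≤ PySem.List.pyGetD U2 i2 0) := by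
        intro r' hr' hnot
        rw [hr']
        constructor
        · rintro ⟨i2, hk1, hk2, hk3, rest⟩; exact ⟨i2, by omega, hk2, hk3, rest⟩
        · rintro ⟨i2, hk1, hk2, hk3, i1, hi0, hi1, hi2, hi3⟩
          by_cases hik : i2 = i
          · subst hik
            exfalso
            exact hnot ⟨hk3, (hbest' (PySem.List.pyGetD U2 i2 0)).mpr ⟨i1, hi0, by omega, hi2, hi3⟩⟩
          · exact ⟨i2, by omega, hk2, hk3, i1, hi0, hi1, hi2, hi3⟩
      rw [hcB_loop]
      rw [hcA_idx_eq L1 i h0 (by omega), hcA_idx_eq L2 i h0 (by omega)]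
      dsimp only
      split_ifs with hw
      · cases hb : hcB_upd m best (PySem.List.pyGetD L1 i 0) with
        | none =>
            dsimp only
            rw [hb] at hr
            refine ⟨r, hr, hsplit r hiff ?_⟩
            rintro ⟨_, b, hb', _⟩; rw [hb] at hb'; cases hb'
        | some b =>
            dsimp only
            rw [hb] at hr
            rw [hcA_idx_eq U2 i h0 (by omega)]
            dsimp only
            split_ifs with hbu
            · refine ⟨true, rfl, iff_of_true rfl ?_⟩
              obtain ⟨i1, hi0, hi1, hi2, hi3⟩ :=
                (hbest' (PySem.List.pyGetD U2 i 0)).mp ⟨b, hb, hbu⟩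
              exact ⟨i, le_refl _, him, hw, i1, hi0, by omega, hi2, hi3⟩
            · refine ⟨r, hr, hsplit r hiff ?_⟩
              rintro ⟨_, b', hb', hbu'⟩
              rw [hb] at hb'
              simp only [Option.some.injEq] at hb'; subst hb'; omega
      · refine ⟨r, hr, hsplit r hiff ?_⟩
        rintro ⟨h, _⟩; omega

-- ===== VERDICT (by name: the statement is the Claim_ definition above) =====
theorem have_comparable_spec : Claim_equal_have_comparable := by
  intro L1 U1 L2 U2 m _ hpre
  obtain ⟨h1, h2, h3⟩ := hpre
  unfold Spec_have_comparable have_comparable have_comparable_alt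
  by_cases hm : 0 ≤ m
  · obtain ⟨ra, hra, hiffa⟩ := hcA_outer_iff L1 L2 U2 m m.toNat 0 (le_refl 0) (by omega) h1 h2 h3
    obtain ⟨rb, hrb, hiffb⟩ := hcB_loop_iff L1 L2 U2 m m.toNat 0 none (le_refl 0) (by omega)
        h1 h2 h3 (by
          intro u
          constructor
          · rintro ⟨b, hb, _⟩; cases hb
          · rintro ⟨j, hj0, hj1, _⟩; omega)
    rw [hra, hrb]
    simp only [Option.getD_some]
    cases ra with
    | true =>
        obtain ⟨i, hi1, hi2, hi3, j, hj1, hj2, hj3, hj4⟩ := hiffa.mp rfl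
        exact ((hiffb.mpr ⟨j, by omega, hj2, hj3, i, hi1, hj1, hi3, hj4⟩)).symm
    | false =>
        cases rb with
        | true =>
            obtain ⟨i2, hk1, hk2, hk3, i1, hi0, hi1, hi2, hi3⟩ := hiffb.mp rfl
            have hfa : (false : Bool) = true :=
              hiffa.mpr ⟨i1, hi0, by omega, hi2, i2, hi1, hk2, hk3, hi3⟩
            simp at hfa
        | false => rfl
  · have hz : m.toNat = 0 := by omega
    rw [hz]
    rfl
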